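-- pv_equiv track=rewrite | github.com/NandanHemanth/BuckBounty | backend/mention_handler.py | generate_savings_suggestions
-- ===== SOURCE A (Python) =====
-- from typing import List, Dict, Any, Optional
--
-- def generate_savings_suggestions(merchant_name: str, transactions: List[Dict], coupons: List[Dict]) -> List[Dict[str, Any]]:
--     """Generate savings suggestions based on merchant and transaction data"""
--     suggestions = []
--
--     # Add coupon suggestions
--     for coupon in coupons[:3]:  # Limit to top 3 coupons
--         suggestions.append({
--             "type": "coupon",
--             "merchant": coupon.get('merchant'),
--             "code": coupon.get('code'),
--             "description": coupon.get('description'),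
--             "discount_value": coupon.get('discount_value'),
--             "expiry_date": coupon.get('expiry_date')
--         })
--
--     # Add alternative suggestions based on merchant type
--     merchant_lower = merchant_name.lower()
--
--     if any(keyword in merchant_lower for keyword in ['uber', 'lyft', 'taxi', 'ride']):
--         suggestions.append({
--             "type": "alternative",
--             "title": "Public Transportation",
--             "suggestion": "Consider taking the subway or bus instead",
--             "estimated_savings": "$10-15 per trip",
--             "environmental_benefit": "Reduces carbon footprint by 45%"
--         })
--         suggestions.append({
--             "type": "alternative",
--             "title": "Bike Share",
--             "suggestion": "Use bike-sharing services for short distances",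
--             "estimated_savings": "$5-10 per trip",
--             "health_benefit": "Great exercise and faster in traffic"
--         })
--
--     elif any(keyword in merchant_lower for keyword in ['starbucks', 'coffee', 'cafe']):
--         suggestions.append({
--             "type": "alternative",
--             "title": "Home Brewing",
--             "suggestion": "Brew coffee at home and bring it in a thermos",
--             "estimated_savings": "$100-150 per month",
--             "tip": "Invest in a good coffee maker - pays for itself in 2 months"
--         })
--
--     elif any(keyword in merchant_lower for keyword in ['doordash', 'ubereats', 'grubhub', 'delivery']):
--         suggestions.append({
--             "type": "alternative",
--             "title": "Meal Prep",
--             "suggestion": "Cook meals at home and meal prep for the week",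
--             "estimated_savings": "$200-300 per month",
--             "tip": "Batch cooking on Sundays saves time and money"
--         })
--         suggestions.append({
--             "type": "alternative",
--             "title": "Pickup Instead of Delivery",
--             "suggestion": "Pick up food yourself to avoid delivery fees",
--             "estimated_savings": "$5-10 per order"
--         })
--
--     elif any(keyword in merchant_lower for keyword in ['amazon', 'shopping', 'retail']):
--         suggestions.append({
--             "type": "alternative",
--             "title": "Wait for Sales",
--             "suggestion": "Add items to wishlist and wait for Prime Day or Black Friday",
--             "estimated_savings": "20-50% off regular prices"
--         })
--         suggestions.append({
--             "type": "alternative",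
--             "title": "Buy Used or Refurbished",
--             "suggestion": "Check Amazon Warehouse or eBay for like-new items",
--             "estimated_savings": "30-60% off new prices"
--         })
--
--     return suggestions
-- ===== SOURCE B (Python) =====
-- _TRANSIT = [
--     {"type": "alternative", "title": "Public Transportation",
--      "suggestion": "Consider taking the subway or bus instead",
--      "estimated_savings": "$10-15 per trip",
--      "environmental_benefit": "Reduces carbon footprint by 45%"},
--     {"type": "alternative", "title": "Bike Share",
--      "suggestion": "Use bike-sharing services for short distances",
--      "estimated_savings": "$5-10 per trip",
--      "health_benefit": "Great exercise and faster in traffic"},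
-- ]
-- _COFFEE = [
--     {"type": "alternative", "title": "Home Brewing",
--      "suggestion": "Brew coffee at home and bring it in a thermos",
--      "estimated_savings": "$100-150 per month",
--      "tip": "Invest in a good coffee maker - pays for itself in 2 months"},
-- ]
-- _FOOD = [
--     {"type": "alternative", "title": "Meal Prep",
--      "suggestion": "Cook meals at home and meal prep for the week",
--      "estimated_savings": "$200-300 per month",
--      "tip": "Batch cooking on Sundays saves time and money"},
--     {"type": "alternative", "title": "Pickup Instead of Delivery",
--      "suggestion": "Pick up food yourself to avoid delivery fees",
--      "estimated_savings": "$5-10 per order"},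
-- ]
-- _SHOP = [
--     {"type": "alternative", "title": "Wait for Sales",
--      "suggestion": "Add items to wishlist and wait for Prime Day or Black Friday",
--      "estimated_savings": "20-50% off regular prices"},
--     {"type": "alternative", "title": "Buy Used or Refurbished",
--      "suggestion": "Check Amazon Warehouse or eBay for like-new items",
--      "estimated_savings": "30-60% off new prices"},
-- ]
--
-- # Flat keyword index: one (keyword -> payload) entry per keyword, in priority
-- # order, so a SINGLE scan over keywords replaces the per-category any() scans.
-- _KEYWORD_SUGGESTIONS = (
--     [(k, _TRANSIT) for k in ("uber", "lyft", "taxi", "ride")]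
--     + [(k, _COFFEE) for k in ("starbucks", "coffee", "cafe")]
--     + [(k, _FOOD) for k in ("doordash", "ubereats", "grubhub", "delivery")]
--     + [(k, _SHOP) for k in ("amazon", "shopping", "retail")]
-- )
--
--
-- def _first_match(pairs, text):
--     for keyword, payload in pairs:
--         if keyword in text:
--             return payload
--     return None
--
--
-- def _coupon_rows(coupons, budget):
--     if budget == 0 or not coupons:
--         return []
--     c = coupons[0]
--     row = {"type": "coupon",
--            "merchant": c.get("merchant"),
--            "code": c.get("code"),
--            "description": c.get("description"),
--            "discount_value": c.get("discount_value"),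
--            "expiry_date": c.get("expiry_date")}
--     return [row] + _coupon_rows(coupons[1:], budget - 1)
--
--
-- def generate_savings_suggestions(merchant_name, transactions, coupons):
--     tail = _first_match(_KEYWORD_SUGGESTIONS, merchant_name.lower()) or []
--     return _coupon_rows(coupons, 3) + [dict(d) for d in tail]
-- ===== Notes on version B (the rewrite author's own statement) =====
-- stated objective: alternative
-- what changed: Replaced the slice-and-append loop by a bounded recursion over coupons, and the four-way if/elif chain of per-category any() scans by a single linear scan of a flat keyword-to-payload index that returns the first keyword found in the merchant name.
import Mathlib
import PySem

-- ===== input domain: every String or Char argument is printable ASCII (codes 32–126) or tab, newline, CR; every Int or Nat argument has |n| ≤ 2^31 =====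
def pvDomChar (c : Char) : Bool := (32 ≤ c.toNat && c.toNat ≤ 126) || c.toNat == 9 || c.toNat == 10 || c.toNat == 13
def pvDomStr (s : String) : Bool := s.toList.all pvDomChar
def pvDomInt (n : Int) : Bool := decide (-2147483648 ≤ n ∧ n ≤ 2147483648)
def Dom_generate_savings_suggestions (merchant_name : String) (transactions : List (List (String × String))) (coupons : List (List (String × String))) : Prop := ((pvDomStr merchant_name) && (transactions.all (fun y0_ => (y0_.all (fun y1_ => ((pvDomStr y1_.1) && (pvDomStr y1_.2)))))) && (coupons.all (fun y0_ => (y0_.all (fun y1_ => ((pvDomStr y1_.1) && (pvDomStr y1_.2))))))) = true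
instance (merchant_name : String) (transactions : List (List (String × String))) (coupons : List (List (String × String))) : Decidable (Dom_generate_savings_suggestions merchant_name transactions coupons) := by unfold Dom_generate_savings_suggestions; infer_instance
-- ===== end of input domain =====

-- B replaces A's slice-and-append loop by a bounded recursion over coupons, and A's
-- four-way if/elif chain of per-category any() scans by one linear scan of a flat
-- keyword-to-payload index (objective: alternative; same return value).

-- ===== PORT A =====
-- the coupon dict A appends for one coupon (dict literal transcribed key by key)
def pvCouponDictA (coupon : List (String × String)) : List (String × Option String) :=
  [("type", some "coupon"),
   ("merchant", (PySem.Dict.mk coupon).get? "merchant"),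
   ("code", (PySem.Dict.mk coupon).get? "code"),
   ("description", (PySem.Dict.mk coupon).get? "description"),
   ("discount_value", (PySem.Dict.mk coupon).get? "discount_value"),
   ("expiry_date", (PySem.Dict.mk coupon).get? "expiry_date")]

def generate_savings_suggestions (merchant_name : String) (transactions : List (List (String × String))) (coupons : List (List (String × String))) : List (List (String × Option String)) :=
  -- for coupon in coupons[:3]: suggestions.append({...})
  let suggestions := (PySem.List.slice coupons none (some 3)).foldl
    (fun acc coupon => acc ++ [pvCouponDictA coupon]) []
  let merchant_lower := PySem.Str.lower merchant_name
  if ["uber", "lyft", "taxi", "ride"].any (fun k => PySem.Str.isIn k merchant_lower) then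
    suggestions
      ++ [[("type", some "alternative"), ("title", some "Public Transportation"),
           ("suggestion", some "Consider taking the subway or bus instead"),
           ("estimated_savings", some "$10-15 per trip"),
           ("environmental_benefit", some "Reduces carbon footprint by 45%")]]
      ++ [[("type", some "alternative"), ("title", some "Bike Share"),
           ("suggestion", some "Use bike-sharing services for short distances"),
           ("estimated_savings", some "$5-10 per trip"),
           ("health_benefit", some "Great exercise and faster in traffic")]]
  else if ["starbucks", "coffee", "cafe"].any (fun k => PySem.Str.isIn k merchant_lower) then
    suggestions
      ++ [[("type", some "alternative"), ("title", some "Home Brewing"),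
           ("suggestion", some "Brew coffee at home and bring it in a thermos"),
           ("estimated_savings", some "$100-150 per month"),
           ("tip", some "Invest in a good coffee maker - pays for itself in 2 months")]]
  else if ["doordash", "ubereats", "grubhub", "delivery"].any (fun k => PySem.Str.isIn k merchant_lower) then
    suggestions
      ++ [[("type", some "alternative"), ("title", some "Meal Prep"),
           ("suggestion", some "Cook meals at home and meal prep for the week"),
           ("estimated_savings", some "$200-300 per month"),
           ("tip", some "Batch cooking on Sundays saves time and money")]]
      ++ [[("type", some "alternative"), ("title", some "Pickup Instead of Delivery"),
           ("suggestion", some "Pick up food yourself to avoid delivery fees"),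
           ("estimated_savings", some "$5-10 per order")]]
  else if ["amazon", "shopping", "retail"].any (fun k => PySem.Str.isIn k merchant_lower) then
    suggestions
      ++ [[("type", some "alternative"), ("title", some "Wait for Sales"),
           ("suggestion", some "Add items to wishlist and wait for Prime Day or Black Friday"),
           ("estimated_savings", some "20-50% off regular prices")]]
      ++ [[("type", some "alternative"), ("title", some "Buy Used or Refurbished"),
           ("suggestion", some "Check Amazon Warehouse or eBay for like-new items"),
           ("estimated_savings", some "30-60% off new prices")]]
  else
    suggestions

-- ===== PORT B =====
-- _TRANSIT / _COFFEE / _FOOD / _SHOP payload constants from Source B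
def pvTransitB : List (List (String × Option String)) :=
  [[("type", some "alternative"), ("title", some "Public Transportation"),
    ("suggestion", some "Consider taking the subway or bus instead"),
    ("estimated_savings", some "$10-15 per trip"),
    ("environmental_benefit", some "Reduces carbon footprint by 45%")],
   [("type", some "alternative"), ("title", some "Bike Share"),
    ("suggestion", some "Use bike-sharing services for short distances"),
    ("estimated_savings", some "$5-10 per trip"),
    ("health_benefit", some "Great exercise and faster in traffic")]]

def pvCoffeeB : List (List (String × Option String)) :=
  [[("type", some "alternative"), ("title", some "Home Brewing"),
    ("suggestion", some "Brew coffee at home and bring it in a thermos"),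
    ("estimated_savings", some "$100-150 per month"),
    ("tip", some "Invest in a good coffee maker - pays for itself in 2 months")]]

def pvFoodB : List (List (String × Option String)) :=
  [[("type", some "alternative"), ("title", some "Meal Prep"),
    ("suggestion", some "Cook meals at home and meal prep for the week"),
    ("estimated_savings", some "$200-300 per month"),
    ("tip", some "Batch cooking on Sundays saves time and money")],
   [("type", some "alternative"), ("title", some "Pickup Instead of Delivery"),
    ("suggestion", some "Pick up food yourself to avoid delivery fees"),
    ("estimated_savings", some "$5-10 per order")]]

def pvShopB : List (List (String × Option String)) :=
  [[("type", some "alternative"), ("title", some "Wait for Sales"),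
    ("suggestion", some "Add items to wishlist and wait for Prime Day or Black Friday"),
    ("estimated_savings", some "20-50% off regular prices")],
   [("type", some "alternative"), ("title", some "Buy Used or Refurbished"),
    ("suggestion", some "Check Amazon Warehouse or eBay for like-new items"),
    ("estimated_savings", some "30-60% off new prices")]]

-- _KEYWORD_SUGGESTIONS: flat keyword->payload index, built by the same four comprehensions
def pvKeywordSuggestionsB : List (String × List (List (String × Option String))) :=
  (["uber", "lyft", "taxi", "ride"].map (fun k => (k, pvTransitB)))
    ++ (["starbucks", "coffee", "cafe"].map (fun k => (k, pvCoffeeB)))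
    ++ (["doordash", "ubereats", "grubhub", "delivery"].map (fun k => (k, pvFoodB)))
    ++ (["amazon", "shopping", "retail"].map (fun k => (k, pvShopB)))

-- _first_match: linear scan returning the first payload whose keyword occurs in text
def pvFirstMatchB {T : Type} (pairs : List (String × T)) (text : String) : Option T :=
  match pairs with
  | [] => none
  | (kw, payload) :: rest =>
    if PySem.Str.isIn kw text then some payload else pvFirstMatchB rest text

-- _coupon_rows: bounded recursion over coupons (budget counts down from 3)
def pvCouponRowsB (coupons : List (List (String × String))) (budget : Nat) : List (List (String × Option String)) :=
  match budget, coupons with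
  | 0, _ => []
  | _ + 1, [] => []
  | b + 1, c :: rest =>
    [[("type", some "coupon"),
      ("merchant", (PySem.Dict.mk c).get? "merchant"),
      ("code", (PySem.Dict.mk c).get? "code"),
      ("description", (PySem.Dict.mk c).get? "description"),
      ("discount_value", (PySem.Dict.mk c).get? "discount_value"),
      ("expiry_date", (PySem.Dict.mk c).get? "expiry_date")]] ++ pvCouponRowsB rest b

def generate_savings_suggestions_alt (merchant_name : String) (transactions : List (List (String × String))) (coupons : List (List (String × String))) : List (List (String × Option String)) :=
  -- tail = _first_match(_KEYWORD_SUGGESTIONS, merchant_name.lower()) or []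
  let tail := match pvFirstMatchB pvKeywordSuggestionsB (PySem.Str.lower merchant_name) with
    | some payload => payload  -- payload lists are non-empty, so 'or' keeps them
    | none => []
  -- _coupon_rows(coupons, 3) + [dict(d) for d in tail]
  pvCouponRowsB coupons 3 ++ tail.map (fun d => d)

-- ===== PRECONDITION & SPEC =====
def Spec_generate_savings_suggestions (merchant_name : String) (transactions : List (List (String × String))) (coupons : List (List (String × String))) (out : List (List (String × Option String))) : Prop := out = generate_savings_suggestions_alt merchant_name transactions coupons
instance (merchant_name : String) (transactions : List (List (String × String))) (coupons : List (List (String × String))) (out : List (List (String × Option String))) : Decidable (Spec_generate_savings_suggestions merchant_name transactions coupons out) := by unfold Spec_generate_savings_suggestions; infer_instance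

-- ===== CLAIM =====
def Claim_equal_generate_savings_suggestions : Prop := ∀ (merchant_name : String) (transactions : List (List (String × String))) (coupons : List (List (String × String))), Dom_generate_savings_suggestions merchant_name transactions coupons → Spec_generate_savings_suggestions merchant_name transactions coupons (generate_savings_suggestions merchant_name transactions coupons)

-- ===== LEMMAS AND PROOFS =====
-- B's recursive coupon builder is A's map over the first three coupons
theorem pvCouponRowsB_eq_map (coupons : List (List (String × String))) (budget : Nat) :
    pvCouponRowsB coupons budget = (coupons.take budget).map pvCouponDictA := by
  induction coupons generalizing budget with
  | nil => cases budget <;> simp [pvCouponRowsB]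
  | cons c rest ih =>
    cases budget with
    | zero => simp [pvCouponRowsB]
    | succ b => simp [pvCouponRowsB, ih, pvCouponDictA]

-- the flat scan distributes over append
theorem pvFirstMatchB_append {T : Type} (l1 l2 : List (String × T)) (text : String) :
    pvFirstMatchB (l1 ++ l2) text
      = ((pvFirstMatchB l1 text).rec (pvFirstMatchB l2 text) (fun p => some p)) := by
  induction l1 with
  | nil => simp [pvFirstMatchB]
  | cons p rest ih =>
    obtain ⟨kw, payload⟩ := p
    cases h : PySem.Str.isIn kw text <;>
      simp only [List.cons_append, pvFirstMatchB, h, Bool.false_eq_true, if_false, if_true, ih]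

-- the flat scan over one category's keywords is that category's any() test
theorem pvFirstMatchB_const {T : Type} (kws : List String) (pl : T) (text : String) :
    pvFirstMatchB (kws.map (fun k => (k, pl))) text
      = if kws.any (fun k => PySem.Str.isIn k text) then some pl else none := by
  induction kws with
  | nil => simp [pvFirstMatchB]
  | cons kw rest ih =>
    cases h : PySem.Str.isIn kw text <;>
      simp only [List.map_cons, List.any_cons, pvFirstMatchB, h, Bool.false_eq_true, if_false,
        if_true, Bool.false_or, Bool.true_or, ih]

-- ===== VERDICT =====
theorem generate_savings_suggestions_spec : Claim_equal_generate_savings_suggestions := by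
  intro merchant_name transactions coupons _
  unfold Spec_generate_savings_suggestions
  unfold generate_savings_suggestions generate_savings_suggestions_alt
  simp only [PySem.List.foldl_append_singleton_eq_map, List.nil_append,
    pvKeywordSuggestionsB, pvFirstMatchB_append,
    pvFirstMatchB_const, pvCouponRowsB_eq_map]
  rw [PySem.List.slice_to]
  cases h1 : ["uber", "lyft", "taxi", "ride"].any
      (fun k => PySem.Str.isIn k (PySem.Str.lower merchant_name)) <;>
  cases h2 : ["starbucks", "coffee", "cafe"].any
      (fun k => PySem.Str.isIn k (PySem.Str.lower merchant_name)) <;>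
  cases h3 : ["doordash", "ubereats", "grubhub", "delivery"].any
      (fun k => PySem.Str.isIn k (PySem.Str.lower merchant_name)) <;>
  cases h4 : ["amazon", "shopping", "retail"].any
      (fun k => PySem.Str.isIn k (PySem.Str.lower merchant_name)) <;>
  simp [pvTransitB, pvCoffeeB, pvFoodB, pvShopB]
  norm_num
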